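-- pv_equiv track=rewrite | github.com/parvathy-shani/Dynamic-Timetable-Generator-Algorithm-Implementation | Step14_hardconstraints.py | hc_class_conflicts
-- ===== SOURCE A (Python) =====
-- def hc_class_conflicts(timetable):
--     violation_count = 0
--     for p1 in timetable:
--         for p2 in timetable:
--             if p1 != p2 and len(p1) > 0 and len(p2) > 0:  # Added length check
--                 if len(p1[0]) > 2 and len(p2[0]) > 2:  # Added length check for inner list
--                     if p1[0][2] == p2[0][2] and p1[0][0] == p2[0][0]:
--                         violation_count += 1
--     return violation_count
-- ===== SOURCE B (Python) =====
-- def hc_class_conflicts(timetable):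
--     # One pass: for each valid period, previous periods with the same
--     # (class, something) key but a different value each contribute 2 ordered
--     # conflicting pairs (p, q) and (q, p).
--     key_count = {}
--     val_count = {}
--     total = 0
--     for p in timetable:
--         if len(p) > 0 and len(p[0]) > 2:
--             key = (p[0][0], p[0][2])
--             val = tuple(tuple(r) for r in p)
--             kn = key_count.get(key, 0)
--             vn = val_count.get(val, 0)
--             total += 2 * (kn - vn)
--             key_count[key] = kn + 1
--             val_count[val] = vn + 1
--     return total
-- ===== Notes on version B (the rewrite author's own statement) =====
-- stated objective: faster
-- what changed: Replaced the all-pairs double loop with a single pass that keeps per-(class,slot)-key counts and per-exact-value counts in dictionaries, adding 2*(same-key-so-far - same-value-so-far) for each period.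
import Mathlib
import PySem

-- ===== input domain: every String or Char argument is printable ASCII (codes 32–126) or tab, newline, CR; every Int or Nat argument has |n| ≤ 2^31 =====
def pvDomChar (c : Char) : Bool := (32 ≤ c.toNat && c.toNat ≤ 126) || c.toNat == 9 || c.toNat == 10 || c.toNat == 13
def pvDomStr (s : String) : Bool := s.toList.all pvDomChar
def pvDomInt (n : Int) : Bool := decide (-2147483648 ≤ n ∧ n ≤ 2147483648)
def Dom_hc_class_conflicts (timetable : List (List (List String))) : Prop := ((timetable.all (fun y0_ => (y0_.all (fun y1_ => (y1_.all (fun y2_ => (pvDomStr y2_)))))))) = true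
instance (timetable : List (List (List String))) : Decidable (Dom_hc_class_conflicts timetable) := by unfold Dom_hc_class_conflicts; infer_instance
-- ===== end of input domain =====

-- B replaces A's all-pairs double scan by a single pass over the timetable with
-- two count dictionaries (per (class,slot) key and per exact value).

-- ===== PORT A =====
-- p1[0] is transliterated as p1.headD [] — exact, the access is guarded by len(p1) > 0.
def hc_class_conflicts (timetable : List (List (List String))) : Int :=
  timetable.foldl (fun acc p1 =>
    timetable.foldl (fun acc p2 =>
      if p1 ≠ p2 ∧ 0 < p1.length ∧ 0 < p2.length then
        if 2 < (p1.headD []).length ∧ 2 < (p2.headD []).length then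
          if PySem.List.pyGet? (p1.headD []) 2 = PySem.List.pyGet? (p2.headD []) 2 ∧
             PySem.List.pyGet? (p1.headD []) 0 = PySem.List.pyGet? (p2.headD []) 0
          then acc + 1 else acc
        else acc
      else acc) acc) 0

-- ===== PORT B =====
-- Python B's `val = tuple(tuple(r) for r in p)` only makes p hashable; the Lean
-- dictionary is keyed by p itself.  p[0][0] / p[0][2] are transliterated with
-- getD — exact, the accesses are guarded by len(p) > 0 and len(p[0]) > 2.
def hcAltStep
    (st : PySem.Dict (String × String) Int × PySem.Dict (List (List String)) Int × Int)
    (p : List (List String)) :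
    PySem.Dict (String × String) Int × PySem.Dict (List (List String)) Int × Int :=
  let (kc, vc, total) := st
  if 0 < p.length ∧ 2 < (p.headD []).length then
    let key := ((p.headD []).getD 0 "", (p.headD []).getD 2 "")
    let kn := kc.getD key 0
    let vn := vc.getD p 0
    (kc.insert key (kn + 1), vc.insert p (vn + 1), total + 2 * (kn - vn))
  else st

def hc_class_conflicts_alt (timetable : List (List (List String))) : Int :=
  (timetable.foldl hcAltStep (PySem.Dict.empty, PySem.Dict.empty, 0)).2.2

-- ===== PRECONDITION & SPEC =====
def Spec_hc_class_conflicts (timetable : List (List (List String))) (out : Int) : Prop := out = hc_class_conflicts_alt timetable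
instance (timetable : List (List (List String))) (out : Int) : Decidable (Spec_hc_class_conflicts timetable out) := by unfold Spec_hc_class_conflicts; infer_instance

-- ===== CLAIM (what is proved, stated in full; the proofs are below) =====
def Claim_equal_hc_class_conflicts : Prop := ∀ (timetable : List (List (List String))), Dom_hc_class_conflicts timetable → Spec_hc_class_conflicts timetable (hc_class_conflicts timetable)

-- ===== LEMMAS AND PROOFS =====

-- the common mathematical form: the number of ordered conflicting pairs
def pvOK (p : List (List String)) : Bool :=
  decide (0 < p.length) && decide (2 < (p.headD []).length)

def pvKey (p : List (List String)) : String × String :=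
  ((p.headD []).getD 0 "", (p.headD []).getD 2 "")

def pvC (p q : List (List String)) : Int :=
  if p ≠ q ∧ pvOK p ∧ pvOK q ∧ pvKey p = pvKey q then 1 else 0

def pvS (xs : List (List (List String))) (p : List (List String)) : Int :=
  (xs.map (fun q => pvC p q)).sum

def pvF (xs : List (List (List String))) : Int :=
  (xs.map (fun p => pvS xs p)).sum

def pvCKey (xs : List (List (List String))) (k : String × String) : Int :=
  ((xs.filter (fun q => pvOK q && decide (pvKey q = k))).length : Int)

def pvCVal (xs : List (List (List String))) (v : List (List String)) : Int :=
  ((xs.filter (fun q => pvOK q && decide (q = v))).length : Int)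

lemma pvOK_iff (p : List (List String)) :
    pvOK p = true ↔ (0 < p.length ∧ 2 < (p.headD []).length) := by
  simp [pvOK]

lemma pvC_symm (p q : List (List String)) : pvC p q = pvC q p := by
  have h : (p ≠ q ∧ pvOK p ∧ pvOK q ∧ pvKey p = pvKey q) ↔
      (q ≠ p ∧ pvOK q ∧ pvOK p ∧ pvKey q = pvKey p) := by
    constructor <;> rintro ⟨a, b, c, d⟩ <;> exact ⟨Ne.symm a, c, b, d.symm⟩
  simp only [pvC]
  rw [if_congr h rfl rfl]

lemma pvC_self (p : List (List String)) : pvC p p = 0 := by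
  simp [pvC]

lemma pvSumAdd (xs : List (List (List String))) (f g : List (List String) → Int) :
    (xs.map (fun a => f a + g a)).sum = (xs.map f).sum + (xs.map g).sum := by
  induction xs with
  | nil => simp
  | cons a l ih => simp [ih]; ring

lemma pvS_append (xs : List (List (List String))) (a p : List (List String)) :
    pvS (xs ++ [p]) a = pvS xs a + pvC a p := by
  simp [pvS]

lemma pvF_append (xs : List (List (List String))) (p : List (List String)) :
    pvF (xs ++ [p]) = pvF xs + 2 * pvS xs p := by
  unfold pvF
  rw [List.map_append, List.sum_append]
  have h1 : (xs.map fun a => pvS (xs ++ [p]) a) = xs.map fun a => pvS xs a + pvC a p :=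
    List.map_congr_left (fun a _ => pvS_append xs a p)
  have h2 : (xs.map fun a => pvC a p) = xs.map fun a => pvC p a :=
    List.map_congr_left (fun a _ => pvC_symm a p)
  rw [h1, pvSumAdd, h2]
  simp [pvS_append, pvC_self]
  show (xs.map (pvS xs)).sum + (xs.map fun a => pvC p a).sum + pvS xs p
      = (xs.map (pvS xs)).sum + 2 * pvS xs p
  unfold pvS
  ring

lemma pvS_of_not_ok (xs : List (List (List String))) (p : List (List String))
    (h : pvOK p = false) : pvS xs p = 0 := by
  induction xs with
  | nil => simp [pvS]
  | cons a l ih =>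
    have : pvC p a = 0 := by simp [pvC, h]
    simp [pvS] at ih ⊢
    simp [this, ih]

lemma pvCKey_cons (a : List (List String)) (xs : List (List (List String))) (k : String × String) :
    pvCKey (a :: xs) k
      = (if (pvOK a && decide (pvKey a = k)) = true then 1 else 0) + pvCKey xs k := by
  by_cases hpred : (pvOK a && decide (pvKey a = k)) = true
  · simp [pvCKey, hpred]; omega
  · simp [pvCKey, hpred]

lemma pvCVal_cons (a : List (List String)) (xs : List (List (List String))) (v : List (List String)) :
    pvCVal (a :: xs) v
      = (if (pvOK a && decide (a = v)) = true then 1 else 0) + pvCVal xs v := by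
  by_cases hpred : (pvOK a && decide (a = v)) = true
  · simp [pvCVal, hpred]; omega
  · simp [pvCVal, hpred]

lemma pvS_of_ok (xs : List (List (List String))) (p : List (List String))
    (h : pvOK p = true) : pvS xs p = pvCKey xs (pvKey p) - pvCVal xs p := by
  induction xs with
  | nil => simp [pvS, pvCKey, pvCVal]
  | cons a l ih =>
    have hS : pvS (a :: l) p = pvC p a + pvS l p := by simp [pvS]
    have hstep : pvC p a
        = (if (pvOK a && decide (pvKey a = pvKey p)) = true then (1 : Int) else 0)
          - (if (pvOK a && decide (a = p)) = true then (1 : Int) else 0) := by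
      by_cases hap : a = p
      · subst hap; simp [pvC, h]
      · have h2 : (pvOK a && decide (a = p)) = false := by simp [hap]
        rw [h2]
        by_cases hok : pvOK a = true
        · by_cases hkey : pvKey a = pvKey p
          · simp [pvC, h, hok, hkey, Ne.symm hap]
          · simp [pvC, hok, hkey]
            exact fun _ _ hk => hkey hk.symm
        · have hok' : pvOK a = false := by simpa using hok
          simp [pvC, hok']
    rw [hS, hstep, ih, pvCKey_cons, pvCVal_cons]
    ring

-- ----- A equals the common form -----

lemma hcA_body (p1 p2 : List (List String)) (acc : Int) :
    (if p1 ≠ p2 ∧ 0 < p1.length ∧ 0 < p2.length then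
        if 2 < (p1.headD []).length ∧ 2 < (p2.headD []).length then
          if PySem.List.pyGet? (p1.headD []) 2 = PySem.List.pyGet? (p2.headD []) 2 ∧
             PySem.List.pyGet? (p1.headD []) 0 = PySem.List.pyGet? (p2.headD []) 0
          then acc + 1 else acc
        else acc
      else acc) = acc + pvC p1 p2 := by
  have getAt : ∀ (l : List String) (i : Nat), i < l.length →
      PySem.List.pyGet? l (i : Int) = some (l.getD i "") := by
    intro l i hi
    rw [PySem.List.pyGet?_natCast, List.getElem?_eq_getElem hi, List.getD_eq_getElem l "" hi]
  by_cases h1 : p1 ≠ p2 ∧ 0 < p1.length ∧ 0 < p2.length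
  · rw [if_pos h1]
    by_cases h2 : 2 < (p1.headD []).length ∧ 2 < (p2.headD []).length
    · rw [if_pos h2]
      have hp : pvOK p1 = true := (pvOK_iff p1).2 ⟨h1.2.1, h2.1⟩
      have hq : pvOK p2 = true := (pvOK_iff p2).2 ⟨h1.2.2, h2.2⟩
      have e10 : PySem.List.pyGet? (p1.headD []) (0 : Int) = some ((p1.headD []).getD 0 "") := by
        have := getAt (p1.headD []) 0 (by omega); simpa using this
      have e12 : PySem.List.pyGet? (p1.headD []) (2 : Int) = some ((p1.headD []).getD 2 "") := by
        have := getAt (p1.headD []) 2 (by omega); simpa using this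
      have e20 : PySem.List.pyGet? (p2.headD []) (0 : Int) = some ((p2.headD []).getD 0 "") := by
        have := getAt (p2.headD []) 0 (by omega); simpa using this
      have e22 : PySem.List.pyGet? (p2.headD []) (2 : Int) = some ((p2.headD []).getD 2 "") := by
        have := getAt (p2.headD []) 2 (by omega); simpa using this
      have hbr : (PySem.List.pyGet? (p1.headD []) 2 = PySem.List.pyGet? (p2.headD []) 2 ∧
             PySem.List.pyGet? (p1.headD []) 0 = PySem.List.pyGet? (p2.headD []) 0)
          ↔ pvKey p1 = pvKey p2 := by
        rw [e10, e12, e20, e22]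
        simp [pvKey, Prod.ext_iff, and_comm]
      by_cases h3 : PySem.List.pyGet? (p1.headD []) 2 = PySem.List.pyGet? (p2.headD []) 2 ∧
             PySem.List.pyGet? (p1.headD []) 0 = PySem.List.pyGet? (p2.headD []) 0
      · rw [if_pos h3, pvC, if_pos ⟨h1.1, hp, hq, hbr.1 h3⟩]
      · rw [if_neg h3, pvC, if_neg (fun hc => h3 (hbr.2 hc.2.2.2))]
        ring
    · rw [if_neg h2, pvC, if_neg]
      · ring
      · rintro ⟨-, hcp, hcq, -⟩
        exact h2 ⟨((pvOK_iff p1).1 hcp).2, ((pvOK_iff p2).1 hcq).2⟩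
  · rw [if_neg h1, pvC, if_neg]
    · ring
    · rintro ⟨hne, hcp, hcq, -⟩
      exact h1 ⟨hne, ((pvOK_iff p1).1 hcp).1, ((pvOK_iff p2).1 hcq).1⟩

lemma hcA_inner (tt2 : List (List (List String))) (p1 : List (List String)) :
    ∀ acc : Int, (tt2.foldl (fun acc p2 =>
      if p1 ≠ p2 ∧ 0 < p1.length ∧ 0 < p2.length then
        if 2 < (p1.headD []).length ∧ 2 < (p2.headD []).length then
          if PySem.List.pyGet? (p1.headD []) 2 = PySem.List.pyGet? (p2.headD []) 2 ∧
             PySem.List.pyGet? (p1.headD []) 0 = PySem.List.pyGet? (p2.headD []) 0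
          then acc + 1 else acc
        else acc
      else acc) acc) = acc + pvS tt2 p1 := by
  induction tt2 with
  | nil => intro acc; simp [pvS]
  | cons a l ih =>
    intro acc
    rw [List.foldl_cons, hcA_body p1 a acc, ih]
    have : pvS (a :: l) p1 = pvC p1 a + pvS l p1 := by simp [pvS]
    rw [this]; ring

lemma hcA_outer (l tt : List (List (List String))) :
    ∀ acc : Int, (l.foldl (fun acc p1 =>
      tt.foldl (fun acc p2 =>
        if p1 ≠ p2 ∧ 0 < p1.length ∧ 0 < p2.length then
          if 2 < (p1.headD []).length ∧ 2 < (p2.headD []).length then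
            if PySem.List.pyGet? (p1.headD []) 2 = PySem.List.pyGet? (p2.headD []) 2 ∧
               PySem.List.pyGet? (p1.headD []) 0 = PySem.List.pyGet? (p2.headD []) 0
            then acc + 1 else acc
          else acc
        else acc) acc) acc) = acc + (l.map (fun p1 => pvS tt p1)).sum := by
  induction l with
  | nil => intro acc; simp
  | cons a l ih =>
    intro acc
    rw [List.foldl_cons, hcA_inner tt a acc, ih]
    simp; ring

lemma hcA_eq_pvF (tt : List (List (List String))) : hc_class_conflicts tt = pvF tt := by
  unfold hc_class_conflicts
  rw [hcA_outer tt tt 0]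
  simp [pvF]

-- ----- B's fold invariant -----

lemma hcB_inv (xs : List (List (List String))) :
    (∀ k, (xs.foldl hcAltStep (PySem.Dict.empty, PySem.Dict.empty, 0)).1.getD k 0 = pvCKey xs k) ∧
    (∀ v, (xs.foldl hcAltStep (PySem.Dict.empty, PySem.Dict.empty, 0)).2.1.getD v 0 = pvCVal xs v) ∧
    (xs.foldl hcAltStep (PySem.Dict.empty, PySem.Dict.empty, 0)).2.2 = pvF xs := by
  induction xs using List.reverseRecOn with
  | nil =>
    refine ⟨fun k => ?_, fun v => ?_, ?_⟩ <;>
      simp [pvCKey, pvCVal, pvF, PySem.Dict.getD_empty]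
  | append_singleton xs p ih =>
    obtain ⟨ih1, ih2, ih3⟩ := ih
    rw [List.foldl_append] at *
    simp only [List.foldl_cons, List.foldl_nil]
    rcases hst : xs.foldl hcAltStep (PySem.Dict.empty, PySem.Dict.empty, 0) with ⟨kc, vc, t⟩
    rw [hst] at ih1 ih2 ih3
    simp only at ih1 ih2 ih3
    by_cases hp : 0 < p.length ∧ 2 < (p.headD []).length
    · have hok : pvOK p = true := (pvOK_iff p).2 hp
      simp only [hcAltStep, hp]
      refine ⟨fun k => ?_, fun v => ?_, ?_⟩
      · show (kc.insert (pvKey p) (kc.getD (pvKey p) 0 + 1)).getD k 0 = pvCKey (xs ++ [p]) k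
        rw [PySem.Dict.getD_insert]
        have happ : pvCKey (xs ++ [p]) k
            = pvCKey xs k + (if (pvOK p && decide (pvKey p = k)) = true then 1 else 0) := by
          by_cases hpred : (pvOK p && decide (pvKey p = k)) = true
          · simp [pvCKey, List.filter_append, hpred]
          · simp [pvCKey, List.filter_append, hpred]
        rw [happ]
        by_cases hk : k = pvKey p
        · rw [if_pos hk, ih1, hk]
          simp [hok]
        · rw [if_neg hk, ih1]
          have : (pvOK p && decide (pvKey p = k)) = false := by
            simp
            exact fun _ h => hk h.symm
          rw [this]
          simp
      · show (vc.insert p (vc.getD p 0 + 1)).getD v 0 = pvCVal (xs ++ [p]) v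
        rw [PySem.Dict.getD_insert]
        have happ : pvCVal (xs ++ [p]) v
            = pvCVal xs v + (if (pvOK p && decide (p = v)) = true then 1 else 0) := by
          by_cases hpred : (pvOK p && decide (p = v)) = true
          · simp [pvCVal, List.filter_append, hpred]
          · simp [pvCVal, List.filter_append, hpred]
        rw [happ]
        by_cases hv : v = p
        · rw [if_pos hv, ih2, hv]
          simp [hok]
        · rw [if_neg hv, ih2]
          have : (pvOK p && decide (p = v)) = false := by
            simp
            exact fun _ h => hv h.symm
          rw [this]
          simp
      · show t + 2 * (kc.getD (pvKey p) 0 - vc.getD p 0) = pvF (xs ++ [p])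
        rw [pvF_append, pvS_of_ok xs p hok, ih3, ih1, ih2]
    · have hok : pvOK p = false := by
        rw [← Bool.not_eq_true]
        intro hc
        exact hp ((pvOK_iff p).1 hc)
      simp only [hcAltStep, hp, if_false]
      refine ⟨fun k => ?_, fun v => ?_, ?_⟩
      · rw [ih1]
        simp [pvCKey, List.filter_append, hok]
      · rw [ih2]
        simp [pvCVal, List.filter_append, hok]
      · rw [ih3, pvF_append, pvS_of_not_ok xs p hok]
        ring

-- ===== VERDICT (by name: the statement is the Claim_ definition above) =====
theorem hc_class_conflicts_spec : Claim_equal_hc_class_conflicts := by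
  intro tt _
  show hc_class_conflicts tt = hc_class_conflicts_alt tt
  rw [hcA_eq_pvF, hc_class_conflicts_alt, (hcB_inv tt).2.2]
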